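-- pv_equiv track=rewrite | github.com/queelius/computational-explorations | src/higher_order_patterns.py | divisibility_ramsey_numbers
-- ===== SOURCE A (Python) =====
-- from typing import Dict, List, Tuple, Set, Any, Optional
--
-- def divisibility_ramsey_numbers(k: int, max_n: int = 100) -> int:
--     """
--     Compute Ramsey number for divisibility graph on [n].
--
--     R_div(k) = min n such that every 2-coloring of divisibility edges
--     in [n] has a monochromatic chain of length k.
--
--     The divisibility graph has edge {a, b} iff a | b or b | a.
--     This is the COMPLEMENT of the coprime structure in a sense:
--     divisibility is about shared factors, coprimality about their absence.
--     """
--     for n in range(k, max_n + 1):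
--         # Find all chains of length k in the divisibility poset on [n]
--         chains = _find_divisibility_chains(n, k)
--         if not chains:
--             continue
--
--         # Check if every 2-coloring of divisibility edges has a mono chain
--         div_edges = _divisibility_edges(n)
--         if not div_edges:
--             continue
--
--         # For small edge counts, exhaustive; otherwise SAT
--         if len(div_edges) <= 22:
--             all_forced = True
--             for bits in range(2 ** len(div_edges)):
--                 coloring = {e: (bits >> i) & 1 for i, e in enumerate(div_edges)}
--                 if not _has_mono_chain(chains, coloring):
--                     all_forced = False
--                     break
--             if all_forced:
--                 return n
--         # Skip large instances for now
--     return -1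
--
-- def _divisibility_edges(n: int) -> List[Tuple[int, int]]:
--     """Edges in the divisibility graph (Hasse diagram) on [n]."""
--     edges = []
--     for i in range(1, n + 1):
--         for j in range(i + 1, n + 1):
--             if j % i == 0:
--                 edges.append((i, j))
--     return edges
--
-- def _find_divisibility_chains(n: int, k: int) -> List[Tuple[int, ...]]:
--     """Find all chains a_1 | a_2 | ... | a_k in [n]."""
--     chains = []
--
--     def extend(chain: List[int]):
--         if len(chain) == k:
--             chains.append(tuple(chain))
--             return
--         last = chain[-1]
--         for mult in range(2, n // last + 1):
--             nxt = last * mult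
--             if nxt <= n:
--                 chain.append(nxt)
--                 extend(chain)
--                 chain.pop()
--
--     for start in range(1, n + 1):
--         extend([start])
--     return chains
--
-- def _has_mono_chain(chains: List[Tuple[int, ...]], coloring: dict) -> bool:
--     """Check if any chain is monochromatic under the edge coloring."""
--     for chain in chains:
--         colors = set()
--         for i in range(len(chain) - 1):
--             e = (chain[i], chain[i + 1])
--             colors.add(coloring.get(e, -1))
--         if len(colors) == 1 and -1 not in colors:
--             return True
--     return False
-- ===== SOURCE B (Python) =====
-- def divisibility_ramsey_numbers(k: int, max_n: int = 100) -> int: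
--     """Backtracking re-implementation: instead of enumerating all 2^E edge
--     colorings, recursively assign edge colors one at a time and prune any
--     branch in which some fully-colored chain is already monochromatic."""
--     for n in range(k, max_n + 1):
--         chains = _chains(n, k)
--         if not chains:
--             continue
--         edges = _edges(n)
--         if not edges:
--             continue
--         if len(edges) <= 22:
--             # forced iff no complete coloring avoids a monochromatic chain
--             if not _search(chains, edges, 0, 0):
--                 return n
--     return -1
--
-- def _edges(n: int) -> list:
--     return [(i, j) for i in range(1, n + 1)
--                    for j in range(i + 1, n + 1) if j % i == 0]
--
-- def _chains(n: int, k: int):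
--     def grow(c):
--         if len(c) == k:
--             return [tuple(c)]
--         return [t for m in range(2, n // c[-1] + 1) for t in grow(c + [c[-1] * m])]
--     return [t for s in range(1, n + 1) for t in grow([s])]
--
-- def _mono_complete(chain, coloring) -> bool:
--     """True iff every edge of the chain is colored and all colors agree."""
--     if len(chain) < 2:
--         return False
--     c0 = coloring.get((chain[0], chain[1]), -1)
--     if c0 == -1:
--         return False
--     for a, b in zip(chain[1:], chain[2:]):
--         if coloring.get((a, b), -1) != c0:
--             return False
--     return True
--
-- def _search(chains, edges, m, bits) -> bool:
--     """Is there a 2-coloring extending the first-m-edge assignment `bits`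
--     (bit i = color of edges[i]) that has no monochromatic chain?"""
--     coloring = {e: (bits >> i) & 1 for i, e in enumerate(edges[:m])}
--     if any(_mono_complete(c, coloring) for c in chains):
--         return False
--     if m == len(edges):
--         return True
--     return _search(chains, edges, m + 1, bits) or _search(chains, edges, m + 1, bits + (1 << m))
-- ===== Notes on version B (the rewrite author's own statement) =====
-- stated objective: alternative
-- what changed: The exhaustive `for bits in range(2**E)` enumeration of edge 2-colorings is replaced by a recursive backtracking search that assigns edge colors one at a time and prunes every branch in which some fully-colored chain is already monochromatic; edge/chain precomputation is rewritten as comprehensions/flatMaps instead of accumulator loops.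
import Mathlib
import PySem

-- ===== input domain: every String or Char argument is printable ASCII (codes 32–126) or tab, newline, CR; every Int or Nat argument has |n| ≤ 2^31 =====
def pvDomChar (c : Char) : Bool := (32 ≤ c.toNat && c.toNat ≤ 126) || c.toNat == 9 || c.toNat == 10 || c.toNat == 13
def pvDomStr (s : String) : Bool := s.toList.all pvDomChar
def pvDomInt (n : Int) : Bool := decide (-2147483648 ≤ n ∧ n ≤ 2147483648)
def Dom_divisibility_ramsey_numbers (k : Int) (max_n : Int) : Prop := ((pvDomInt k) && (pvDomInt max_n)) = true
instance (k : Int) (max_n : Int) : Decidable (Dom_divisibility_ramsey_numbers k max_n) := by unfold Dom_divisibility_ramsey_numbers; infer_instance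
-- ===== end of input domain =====

-- B replaces A's exhaustive enumeration of all 2^E edge colorings by a backtracking
-- search over the edges that prunes any branch with an already-monochromatic chain
-- (objective: alternative algorithm, same worst-case cost).

-- ===== PORT A =====
-- _divisibility_edges
def pvEdgesA (n : Int) : List (Int × Int) :=
  (PySem.List.pyRange 1 (n+1) 1).foldl (fun edges i =>
    (PySem.List.pyRange (i+1) (n+1) 1).foldl (fun edges j =>
      if PySem.Int.mod j i = 0 then edges ++ [(i, j)] else edges) edges) []

-- extend (inner recursion of _find_divisibility_chains); fuel = n.toNat+1 is a port
-- artifact for termination (the chain's last element, chain[-1] = pyGetD chain (-1) 0,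
-- at least doubles at each recursive call and stays ≤ n, so callers never exhaust it)
def pvExtendA (n k : Int) : Nat → List Int → List (List Int) → List (List Int)
  | 0, chain, chains =>
    if (chain.length : Int) = k then chains ++ [chain] else chains
  | fuel + 1, chain, chains =>
    if (chain.length : Int) = k then chains ++ [chain]
    else
      (PySem.List.pyRange 2 (PySem.Int.floordiv n (PySem.List.pyGetD chain (-1) 0) + 1) 1).foldl
        (fun acc m =>
          if PySem.List.pyGetD chain (-1) 0 * m ≤ n then
            pvExtendA n k fuel (chain ++ [PySem.List.pyGetD chain (-1) 0 * m]) acc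
          else acc)
        chains

def pvChainsA (n k : Int) : List (List Int) :=
  (PySem.List.pyRange 1 (n+1) 1).foldl (fun acc s => pvExtendA n k (n.toNat + 1) [s] acc) []

-- coloring = {e: (bits >> i) & 1 for i, e in enumerate(div_edges)}  (i ≥ 0, so .toNat is exact)
def pvColorA (edges : List (Int × Int)) (bits : Int) : PySem.Dict (Int × Int) Int :=
  (PySem.List.enumerate edges 0).foldl
    (fun d p => PySem.Dict.insert d p.2 (PySem.Int.band (bits >>> p.1.toNat) 1)) PySem.Dict.empty

-- _has_mono_chain (loop over chains with early `return True`)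
def pvHasMonoA (col : PySem.Dict (Int × Int) Int) : List (List Int) → Bool
  | [] => false
  | c :: rest =>
    let colors : PySem.Set Int :=
      (PySem.List.pyRange 0 ((c.length : Int) - 1) 1).foldl
        (fun s i => PySem.Set.add s (PySem.Dict.getD col
          (PySem.List.pyGetD c i 0, PySem.List.pyGetD c (i+1) 0) (-1))) PySem.Set.empty
    if PySem.Set.len colors = 1 ∧ ¬ PySem.Set.contains colors (-1) then true
    else pvHasMonoA col rest

-- the `for bits in range(2**E)` loop with its early break
def pvAllForcedA (chains : List (List Int)) (edges : List (Int × Int)) : List Int → Bool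
  | [] => true
  | bits :: rest =>
    if pvHasMonoA (pvColorA edges bits) chains then pvAllForcedA chains edges rest else false

def pvLoopA (k : Int) : List Int → Int
  | [] => -1
  | n :: rest =>
    if (pvChainsA n k).isEmpty then pvLoopA k rest
    else if (pvEdgesA n).isEmpty then pvLoopA k rest
    else if (pvEdgesA n).length ≤ 22 then
      if pvAllForcedA (pvChainsA n k) (pvEdgesA n)
          (PySem.List.pyRange 0 ((2 : Int) ^ (pvEdgesA n).length) 1) then n
      else pvLoopA k rest
    else pvLoopA k rest

def divisibility_ramsey_numbers (k : Int) (max_n : Int) : Int :=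
  pvLoopA k (PySem.List.pyRange k (max_n + 1) 1)

-- ===== PORT B =====
-- _edges (comprehension)
def pvEdgesB (n : Int) : List (Int × Int) :=
  (PySem.List.pyRange 1 (n+1) 1).flatMap (fun i =>
    ((PySem.List.pyRange (i+1) (n+1) 1).filter (fun j => PySem.Int.mod j i = 0)).map (fun j => (i, j)))

-- grow (inner recursion of _chains); same fuel discipline as A's extend
def pvGrowB (n k : Int) : Nat → List Int → List (List Int)
  | 0, c => if (c.length : Int) = k then [c] else []
  | fuel + 1, c =>
    if (c.length : Int) = k then [c]
    else
      (PySem.List.pyRange 2 (PySem.Int.floordiv n (PySem.List.pyGetD c (-1) 0) + 1) 1).flatMap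
        (fun m => pvGrowB n k fuel (c ++ [PySem.List.pyGetD c (-1) 0 * m]))

def pvChainsB (n k : Int) : List (List Int) :=
  (PySem.List.pyRange 1 (n+1) 1).flatMap (fun s => pvGrowB n k (n.toNat + 1) [s])

-- the dict comprehension {e: (bits >> i) & 1 for i, e in enumerate(edges[:m])}
def pvColorB (edges : List (Int × Int)) (bits : Int) : PySem.Dict (Int × Int) Int :=
  (PySem.List.enumerate edges 0).foldl
    (fun d p => PySem.Dict.insert d p.2 (PySem.Int.band (bits >>> p.1.toNat) 1)) PySem.Dict.empty

-- _mono_complete (c0 inlined)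
def pvMonoB (c : List Int) (col : PySem.Dict (Int × Int) Int) : Bool :=
  if c.length < 2 then false
  else if PySem.Dict.getD col (PySem.List.pyGetD c 0 0, PySem.List.pyGetD c 1 0) (-1) = -1 then false
  else ((c.drop 1).zip (c.drop 2)).all (fun p =>
    PySem.Dict.getD col p (-1) =
      PySem.Dict.getD col (PySem.List.pyGetD c 0 0, PySem.List.pyGetD c 1 0) (-1))

-- _search; structural recursion on rem = len(edges) - m
def pvSearchB (chains : List (List Int)) (edges : List (Int × Int)) : Nat → Int → Bool
  | 0, bits =>
    if chains.any (fun c => pvMonoB c (pvColorB (edges.take (edges.length - 0)) bits)) then false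
    else true
  | rem + 1, bits =>
    if chains.any (fun c =>
        pvMonoB c (pvColorB (edges.take (edges.length - (rem + 1))) bits)) then false
    else
      pvSearchB chains edges rem bits ||
      pvSearchB chains edges rem (bits + (1 <<< (edges.length - (rem + 1))))

def pvLoopB (k : Int) : List Int → Int
  | [] => -1
  | n :: rest =>
    if (pvChainsB n k).isEmpty then pvLoopB k rest
    else if (pvEdgesB n).isEmpty then pvLoopB k rest
    else if (pvEdgesB n).length ≤ 22 then
      if ¬ pvSearchB (pvChainsB n k) (pvEdgesB n) (pvEdgesB n).length 0 then n
      else pvLoopB k rest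
    else pvLoopB k rest

def divisibility_ramsey_numbers_alt (k : Int) (max_n : Int) : Int :=
  pvLoopB k (PySem.List.pyRange k (max_n + 1) 1)

-- ===== PRECONDITION & SPEC =====
def Spec_divisibility_ramsey_numbers (k : Int) (max_n : Int) (out : Int) : Prop := out = divisibility_ramsey_numbers_alt k max_n
instance (k : Int) (max_n : Int) (out : Int) : Decidable (Spec_divisibility_ramsey_numbers k max_n out) := by unfold Spec_divisibility_ramsey_numbers; infer_instance

-- ===== CLAIM (what is proved, stated in full; the proofs are below) =====
def Claim_equal_divisibility_ramsey_numbers : Prop := ∀ (k : Int) (max_n : Int), Dom_divisibility_ramsey_numbers k max_n → Spec_divisibility_ramsey_numbers k max_n (divisibility_ramsey_numbers k max_n)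

-- ===== LEMMAS AND PROOFS =====

-- chain[-1] of a nonempty list
theorem pv_getD_last (l : List Int) (x : Int) :
    PySem.List.pyGetD (l ++ [x]) (-1) 0 = x := by
  simp [PySem.List.pyGetD, PySem.List.pyGet?, PySem.List.pyIdx?]

-- The two edge lists are equal.
theorem pv_edges_eq (n : Int) : pvEdgesA n = pvEdgesB n := by
  unfold pvEdgesA pvEdgesB
  rw [PySem.List.foldl_congr_mem _ _
      (fun E i => E ++ ((PySem.List.pyRange (i+1) (n+1) 1).filter
        (fun j => decide (PySem.Int.mod j i = 0))).map (fun j => (i, j))) _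
      (fun acc i _ => PySem.List.foldl_append_ite _ _ _ _),
    PySem.List.foldl_append_eq_flatMap]
  simp

-- A's accumulator recursion equals B's flatMap recursion for chain extension.
theorem pv_extend_eq (n k : Int) :
    ∀ (fuel : Nat) (chain : List Int) (acc : List (List Int)),
      1 ≤ PySem.List.pyGetD chain (-1) 0 →
      pvExtendA n k fuel chain acc = acc ++ pvGrowB n k fuel chain := by
  intro fuel
  induction fuel with
  | zero =>
    intro chain acc _
    rw [pvExtendA, pvGrowB]
    by_cases hk : (chain.length : Int) = k <;> simp [hk]
  | succ fuel ih =>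
    intro chain acc h
    rw [pvExtendA, pvGrowB]
    by_cases hk : (chain.length : Int) = k
    · simp [hk]
    · rw [if_neg hk, if_neg hk]
      rw [PySem.List.foldl_congr_mem _ _
          (fun acc m => acc ++ pvGrowB n k fuel (chain ++ [PySem.List.pyGetD chain (-1) 0 * m])) _ ?_,
        PySem.List.foldl_append_eq_flatMap]
      intro acc' m hm
      rw [PySem.List.mem_pyRange_one] at hm
      have hdiv : m ≤ PySem.Int.floordiv n (PySem.List.pyGetD chain (-1) 0) := by omega
      have hmul : PySem.List.pyGetD chain (-1) 0 * m ≤ n := by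
        have := (PySem.Int.le_floordiv_iff_mul_le (by omega)).1 hdiv
        nlinarith
      rw [if_pos hmul, ih _ _ (by rw [pv_getD_last]; nlinarith)]

-- The two chain lists are equal.
theorem pv_chains_eq (n k : Int) : pvChainsA n k = pvChainsB n k := by
  unfold pvChainsA pvChainsB
  have hcongr : ∀ (acc : List (List Int)), ∀ s ∈ PySem.List.pyRange 1 (n+1) 1,
      pvExtendA n k (n.toNat + 1) [s] acc = acc ++ pvGrowB n k (n.toNat + 1) [s] := by
    intro acc s hs
    rw [PySem.List.mem_pyRange_one] at hs
    refine pv_extend_eq n k _ _ _ ?_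
    have h := pv_getD_last [] s
    simp only [List.nil_append] at h
    rw [h]
    omega
  rw [PySem.List.foldl_congr_mem _ _
      (fun acc s => acc ++ pvGrowB n k (n.toNat + 1) [s]) _ hcongr,
    PySem.List.foldl_append_eq_flatMap]
  simp

-- The edge list has no duplicates.
theorem pv_edges_nodup (n : Int) : (pvEdgesB n).Nodup := by
  unfold pvEdgesB
  rw [List.nodup_flatMap]
  constructor
  · intro i _
    refine List.Nodup.map ?_ (List.Nodup.filter _ (PySem.List.nodup_pyRange_one _ _))
    intro a b hab
    simpa using hab
  · refine (PySem.List.pairwise_lt_pyRange_one _ _).imp ?_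
    intro a b hab x hxa hxb
    simp only [List.mem_map, List.mem_filter] at hxa hxb
    obtain ⟨j, _, rfl⟩ := hxa
    obtain ⟨j', _, hj'⟩ := hxb
    have : a = b := by
      have := congrArg Prod.fst hj'
      simpa using this.symm
    omega

-- pairs (chain[i], chain[i+1]) for i in range(len(chain)-1) = zip(chain, chain[1:])
theorem pv_pairs_eq (c : List Int) :
    (PySem.List.pyRange 0 ((c.length : Int) - 1) 1).map
      (fun i => (PySem.List.pyGetD c i 0, PySem.List.pyGetD c (i+1) 0)) = c.zip (c.drop 1) := by
  apply List.ext_getElem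
  · rw [List.length_map, PySem.List.length_pyRange_one, List.length_zip, List.length_drop]
    omega
  · intro k h1 h2
    have hk : k < c.length - 1 := by
      simp [List.length_zip] at h2
      omega
    rw [List.getElem_map, PySem.List.getElem_pyRange_one, List.getElem_zip, List.getElem_drop]
    have e1 : (0 : Int) + (k : Int) = ((k : Nat) : Int) := by omega
    rw [e1]
    have e2 : ((k : Nat) : Int) + 1 = (((k + 1 : Nat)) : Int) := by push_cast; omega
    rw [e2, PySem.List.pyGetD_natCast, PySem.List.pyGetD_natCast]
    rw [List.getD_eq_getElem c 0 (by omega), List.getD_eq_getElem c 0 (by omega)]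
    simp [Nat.add_comm]

-- A's per-chain set of colors is the set of the list of chain-edge colors.
theorem pv_colors_eq (c : List Int) (col : PySem.Dict (Int × Int) Int) :
    (PySem.List.pyRange 0 ((c.length : Int) - 1) 1).foldl
        (fun s i => PySem.Set.add s (PySem.Dict.getD col
          (PySem.List.pyGetD c i 0, PySem.List.pyGetD c (i+1) 0) (-1))) PySem.Set.empty
      = PySem.Set.ofList ((c.zip (c.drop 1)).map (fun p => PySem.Dict.getD col p (-1))) := by
  rw [PySem.Set.ofList_eq_foldl, ← pv_pairs_eq, List.map_map, List.foldl_map]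
  rfl

-- |set(v :: vs)| = 1  ↔  every element of vs is v
theorem pv_len_one_iff (v : Int) (vs : List Int) :
    PySem.Set.len (PySem.Set.ofList (v :: vs)) = 1 ↔ ∀ y ∈ vs, y = v := by
  rw [PySem.Set.ofList_cons]
  unfold PySem.Set.len
  have hnil : ((PySem.Set.ofList vs).discard v = []) ↔ ∀ y ∈ vs, y = v := by
    rw [List.eq_nil_iff_forall_not_mem]
    constructor
    · intro hno y hy
      by_contra hne
      exact hno y ((PySem.Set.mem_discard _ _ _).2 ⟨(PySem.Set.mem_ofList _ _).2 hy, hne⟩)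
    · intro hall y hy
      obtain ⟨hy1, hy2⟩ := (PySem.Set.mem_discard _ _ _).1 hy
      exact hy2 (hall y ((PySem.Set.mem_ofList _ _).1 hy1))
  rw [← hnil]
  simp [List.length_eq_zero_iff]

-- A's set-based per-chain test agrees with B's first-color test (any coloring dict).
set_option maxRecDepth 4096 in
theorem pv_chain_cond_iff (c : List Int) (col : PySem.Dict (Int × Int) Int) :
    (PySem.Set.len ((PySem.List.pyRange 0 ((c.length : Int) - 1) 1).foldl
        (fun s i => PySem.Set.add s (PySem.Dict.getD col
          (PySem.List.pyGetD c i 0, PySem.List.pyGetD c (i+1) 0) (-1))) PySem.Set.empty) = 1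
      ∧ ¬ PySem.Set.contains ((PySem.List.pyRange 0 ((c.length : Int) - 1) 1).foldl
        (fun s i => PySem.Set.add s (PySem.Dict.getD col
          (PySem.List.pyGetD c i 0, PySem.List.pyGetD c (i+1) 0) (-1))) PySem.Set.empty) (-1))
    ↔ pvMonoB c col = true := by
  rw [pv_colors_eq]
  by_cases hlen : c.length < 2
  · have hz : c.zip (c.drop 1) = [] := by
      apply List.eq_nil_of_length_eq_zero
      simp [List.length_zip]
      omega
    rw [hz]
    simp [pvMonoB, hlen, PySem.Set.ofList_nil, PySem.Set.len]
  · obtain ⟨a, b, t, rfl⟩ : ∃ a b t, c = a :: b :: t := by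
      match c, hlen with
      | a :: b :: t, _ => exact ⟨a, b, t, rfl⟩
      | [], h => exact absurd (by simp) h
      | [a], h => exact absurd (by simp) h
    have hget0 : PySem.List.pyGetD (a :: b :: t) 0 0 = a := by
      have := PySem.List.pyGetD_natCast (a :: b :: t) 0 0
      simpa using this
    have hget1 : PySem.List.pyGetD (a :: b :: t) 1 0 = b := by
      have := PySem.List.pyGetD_natCast (a :: b :: t) 1 0
      simpa using this
    have hzip : (a :: b :: t).zip ((a :: b :: t).drop 1) = (a, b) :: ((b :: t).zip t) := rfl
    have hdrop : ((a :: b :: t).drop 1).zip ((a :: b :: t).drop 2) = (b :: t).zip t := rfl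
    simp only [pvMonoB, hget0, hget1, hzip, hdrop, List.map_cons]
    rw [pv_len_one_iff]
    rw [if_neg (show ¬ (a :: b :: t).length < 2 by simp only [List.length_cons]; omega)]
    by_cases h0 : PySem.Dict.getD col (a, b) (-1) = -1
    · simp only [if_pos h0]
      constructor
      · rintro ⟨h1, h2⟩
        exfalso
        refine h2 ((PySem.Set.contains_iff _ _).2 ((PySem.Set.mem_ofList _ _).2 ?_))
        simp [h0]
      · intro hfalse
        simp at hfalse
    · simp only [if_neg h0]
      rw [List.all_eq_true]
      constructor
      · rintro ⟨h1, _⟩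
        intro p hp
        simp only [decide_eq_true_eq]
        exact h1 _ (List.mem_map_of_mem (f := fun (p : Int × Int) => PySem.Dict.getD col p (-1)) hp)
      · intro hall
        constructor
        · intro y hy
          obtain ⟨p, hp, rfl⟩ := List.mem_map.1 hy
          simpa using hall p hp
        · intro hcon
          have hmem := (PySem.Set.mem_ofList _ _).1 ((PySem.Set.contains_iff _ _).1 hcon)
          simp only [List.mem_cons] at hmem
          rcases hmem with h | h
          · exact h0 h.symm
          · obtain ⟨p, hp, hpe⟩ := List.mem_map.1 h
            have hv := hall p hp
            simp only [decide_eq_true_eq] at hv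
            rw [hpe] at hv
            exact h0 hv.symm

-- A's chain loop with early return = any over B's per-chain test.
theorem pv_hasMono_eq_any (col : PySem.Dict (Int × Int) Int) (chains : List (List Int)) :
    pvHasMonoA col chains = chains.any (fun c => pvMonoB c col) := by
  induction chains with
  | nil => rfl
  | cons c rest ih =>
    simp only [pvHasMonoA, List.any_cons]
    by_cases hc : pvMonoB c col = true
    · rw [if_pos ((pv_chain_cond_iff c col).2 hc)]
      simp [hc]
    · rw [if_neg (fun hcond => hc ((pv_chain_cond_iff c col).1 hcond))]
      simp [hc, ih]

theorem pv_colorA_eq_colorB : pvColorA = pvColorB := rfl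

-- keys of the coloring dict are unique
theorem pv_color_keys_nodup (l : List (Int × Int)) (bits : Int) :
    (pvColorB l bits).keys.Nodup := by
  unfold pvColorB
  exact PySem.Dict.nodup_keys_foldl_insert_key (PySem.List.enumerate l 0)
    (fun p : Int × (Int × Int) => p.2)
    (fun _ p => PySem.Int.band (bits >>> (p.1.toNat : Int)) 1)
    PySem.Dict.empty (by exact List.nodup_nil)

theorem pv_color_items (l : List (Int × Int)) (bits : Int) (h : l.Nodup) :
    (pvColorB l bits).items
      = (PySem.List.enumerate l 0).map (fun p => (p.2, PySem.Int.band (bits >>> p.1.toNat) 1)) := by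
  unfold pvColorB
  rw [PySem.Dict.items_foldl_insert_fresh _ _ _ _
      (fun a _ => PySem.Dict.contains_empty _)
      (by rw [PySem.List.map_snd_enumerate]; exact h)]
  rfl

theorem pv_color_getD (l : List (Int × Int)) (bits : Int) (h : l.Nodup)
    (i : Nat) (hi : i < l.length) :
    (pvColorB l bits).getD l[i] (-1) = PySem.Int.band (bits >>> (i : Int)) 1 := by
  have hlen : i < (PySem.List.enumerate l 0).length := by
    rw [PySem.List.length_enumerate]; exact hi
  have hmem : (l[i], PySem.Int.band (bits >>> (i : Int)) 1) ∈ (pvColorB l bits).items := by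
    rw [pv_color_items l bits h]
    refine List.mem_map.2 ⟨(PySem.List.enumerate l 0)[i], List.getElem_mem _, ?_⟩
    rw [PySem.List.getElem_enumerate]
    have ht : ((((0 : Int) + (i : Int)).toNat : Nat) : Int) = (i : Int) := by omega
    exact congrArg (fun t : Int => (l[i], PySem.Int.band (bits >>> t) 1)) ht
  exact PySem.Dict.getD_of_mem_items _ hmem (pv_color_keys_nodup l bits) _

theorem pv_color_getD_not_mem (l : List (Int × Int)) (bits : Int) (e : Int × Int)
    (he : e ∉ l) : (pvColorB l bits).getD e (-1) = -1 := by
  apply PySem.Dict.getD_of_not_contains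
  unfold pvColorB
  rw [PySem.Dict.contains_eq_decide_mem_keys, PySem.Dict.keys_foldl_insert_key,
    PySem.List.map_snd_enumerate]
  simp only [PySem.Dict.keys_empty, PySem.Set.update_nil_left]
  simp [PySem.Set.mem_ofList, he]

-- bits below position m are unchanged by adding 2^m * h
theorem pv_bit_agree (b h m i : Nat) (hi : i < m) :
    PySem.Int.band (((b + 2^m * h : Nat) : Int) >>> (i : Int)) 1
      = PySem.Int.band ((b : Int) >>> (i : Int)) 1 := by
  rw [Int.shiftRight_natCast, Int.shiftRight_natCast]
  have h1 : (1 : Int) = ((1 : Nat) : Int) := by norm_num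
  rw [h1, PySem.Int.band_natCast, PySem.Int.band_natCast]
  suffices hnat : (b + 2^m*h) >>> i &&& 1 = b >>> i &&& 1 by rw [hnat]
  rw [Nat.and_one_is_mod, Nat.and_one_is_mod, Nat.shiftRight_eq_div_pow,
    Nat.shiftRight_eq_div_pow]
  have hpow : (2:Nat)^m = 2^i * 2^(m-i) := by
    rw [← pow_add]
    congr 1
    omega
  have hsplit : b + 2^m*h = b + 2^i * (2^(m-i) * h) := by
    rw [hpow]; ring
  rw [hsplit, Nat.add_mul_div_left _ _ (by positivity)]
  have h2 : b / 2^i + 2^(m-i) * h = b / 2^i + (2^(m-i-1) * h) * 2 := by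
    have hp : (2:Nat)^(m-i) = 2^(m-i-1) * 2 := by
      rw [← pow_succ]
      congr 1
      omega
    rw [hp]; ring
  rw [h2, Nat.add_mul_mod_self_right]

-- a color read off the prefix coloring survives into any extension of the bits
theorem pv_getD_lift (E : List (Int × Int)) (hnd : E.Nodup) (m : Nat) (hm : m ≤ E.length)
    (b h : Nat) (_hb : b < 2^m) (e : Int × Int) (v : Int)
    (hv : (pvColorB (E.take m) (b : Int)).getD e (-1) = v) (hne : v ≠ -1) :
    (pvColorB E ((b + 2^m * h : Nat) : Int)).getD e (-1) = v := by
  have hpre : (E.take m).Nodup := hnd.sublist (List.take_sublist _ _)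
  have hmem : e ∈ E.take m := by
    by_contra hno
    rw [pv_color_getD_not_mem _ _ _ hno] at hv
    exact hne hv.symm
  obtain ⟨i, hi, hei⟩ := List.getElem_of_mem hmem
  have hlen : (E.take m).length = m := by
    rw [List.length_take]; omega
  have him : i < m := by omega
  have hiE : i < E.length := by omega
  have heE : E[i] = e := by
    rw [← hei, List.getElem_take]
  rw [← heE, pv_color_getD E _ hnd i hiE]
  rw [← hei, pv_color_getD (E.take m) _ hpre i (by omega)] at hv
  rw [← hv]
  exact pv_bit_agree b h m i him

-- a chain monochromatic under a completed prefix stays monochromatic in any extension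
theorem pv_mono_lift (E : List (Int × Int)) (hnd : E.Nodup) (m : Nat) (hm : m ≤ E.length)
    (b h : Nat) (hb : b < 2^m) (c : List Int)
    (hc : pvMonoB c (pvColorB (E.take m) (b : Int)) = true) :
    pvMonoB c (pvColorB E ((b + 2^m * h : Nat) : Int)) = true := by
  unfold pvMonoB at hc ⊢
  by_cases hlen : c.length < 2
  · simp [hlen] at hc
  · rw [if_neg hlen] at hc ⊢
    by_cases h0 : (pvColorB (E.take m) (b : Int)).getD
        (PySem.List.pyGetD c 0 0, PySem.List.pyGetD c 1 0) (-1) = -1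
    · rw [if_pos h0] at hc
      simp at hc
    · have hfull0 := pv_getD_lift E hnd m hm b h hb
        (PySem.List.pyGetD c 0 0, PySem.List.pyGetD c 1 0) _ rfl h0
      rw [if_neg h0] at hc
      rw [if_neg (show ¬ (pvColorB E ((b + 2^m*h : Nat) : Int)).getD
          (PySem.List.pyGetD c 0 0, PySem.List.pyGetD c 1 0) (-1) = -1 by
        rw [hfull0]; exact h0)]
      rw [List.all_eq_true] at hc ⊢
      intro p hp
      have hcp := hc p hp
      simp only [decide_eq_true_eq] at hcp ⊢
      rw [hfull0]
      exact pv_getD_lift E hnd m hm b h hb p _ hcp h0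

-- B's backtracking search returns true iff some completion of the current prefix
-- has no monochromatic chain.
theorem pv_search_iff (chains : List (List Int)) (E : List (Int × Int)) (hnd : E.Nodup) :
    ∀ (rem : Nat), rem ≤ E.length → ∀ (b : Nat), b < 2 ^ (E.length - rem) →
      (pvSearchB chains E rem (b : Int) = true ↔
        ∃ h : Nat, h < 2 ^ rem ∧
          chains.any (fun c =>
            pvMonoB c (pvColorB E ((b + 2 ^ (E.length - rem) * h : Nat) : Int))) = false) := by
  intro rem
  induction rem with
  | zero =>
    intro _ b hb
    rw [pvSearchB]
    rw [show E.length - 0 = E.length from rfl, List.take_length]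
    constructor
    · intro ht
      refine ⟨0, by norm_num, ?_⟩
      rw [show b + 2 ^ E.length * 0 = b by ring]
      by_cases hF : List.any chains (fun c => pvMonoB c (pvColorB E (b : Int))) = true
      · rw [if_pos hF] at ht
        simp at ht
      · simpa using hF
    · rintro ⟨h', hh', hF⟩
      rw [pow_zero] at hh'
      rw [show b + 2 ^ E.length * h' = b by
        have : h' = 0 := by omega
        rw [this]; ring] at hF
      rw [if_neg (by simp [hF])]
  | succ rem ih =>
    intro hrem b hb
    rw [pvSearchB]
    by_cases hP : List.any chains
        (fun c => pvMonoB c (pvColorB (E.take (E.length - (rem+1))) (b : Int))) = true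
    · rw [if_pos hP]
      constructor
      · intro hfalse
        simp at hfalse
      · rintro ⟨h', _, hF⟩
        exfalso
        obtain ⟨c, hcmem, hcmono⟩ := List.any_eq_true.1 hP
        have hmono := pv_mono_lift E hnd (E.length - (rem+1)) (by omega) b h' hb c hcmono
        have htrue : List.any chains (fun c =>
            pvMonoB c (pvColorB E ((b + 2 ^ (E.length - (rem+1)) * h' : Nat) : Int))) = true :=
          List.any_eq_true.2 ⟨c, hcmem, hmono⟩
        rw [hF] at htrue
        simp at htrue
    · rw [if_neg hP]
      have hm1 : E.length - rem = (E.length - (rem+1)) + 1 := by omega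
      have hpow : (2:Nat) ^ (E.length - rem) = 2 ^ (E.length - (rem+1)) * 2 := by
        rw [hm1, pow_succ]
      have hb1 : b < 2 ^ (E.length - rem) := by omega
      have hb2 : b + 2 ^ (E.length - (rem+1)) < 2 ^ (E.length - rem) := by omega
      have ih1 := ih (by omega) b hb1
      have ih2 := ih (by omega) (b + 2 ^ (E.length - (rem+1))) hb2
      have hcast : (b : Int) + 1 <<< (E.length - (rem+1))
          = ((b + 2 ^ (E.length - (rem+1)) : Nat) : Int) := by
        rw [Nat.one_shiftLeft]
        push_cast
        ring
      rw [hcast, Bool.or_eq_true, ih1, ih2]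
      have hpow2 : (2:Nat) ^ (rem + 1) = 2 ^ rem * 2 := pow_succ 2 rem
      constructor
      · rintro (⟨h', hh', hF⟩ | ⟨h', hh', hF⟩)
        · refine ⟨2 * h', by omega, ?_⟩
          rw [show b + 2 ^ (E.length - (rem+1)) * (2 * h')
              = b + 2 ^ (E.length - rem) * h' by rw [hpow]; ring]
          exact hF
        · refine ⟨2 * h' + 1, by omega, ?_⟩
          rw [show b + 2 ^ (E.length - (rem+1)) * (2 * h' + 1)
              = b + 2 ^ (E.length - (rem+1)) + 2 ^ (E.length - rem) * h' by rw [hpow]; ring]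
          exact hF
      · rintro ⟨h', hh', hF⟩
        rcases Nat.even_or_odd h' with ⟨q, hq⟩ | ⟨q, hq⟩
        · left
          refine ⟨q, by omega, ?_⟩
          rw [show b + 2 ^ (E.length - rem) * q
              = b + 2 ^ (E.length - (rem+1)) * h' by rw [hpow, hq]; ring]
          exact hF
        · right
          refine ⟨q, by omega, ?_⟩
          rw [show b + 2 ^ (E.length - (rem+1)) + 2 ^ (E.length - rem) * q
              = b + 2 ^ (E.length - (rem+1)) * h' by rw [hpow, hq]; ring]
          exact hF

-- A's bits loop with its break = all over the range
theorem pv_allForced_eq_all (chains : List (List Int)) (E : List (Int × Int)) (l : List Int) :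
    pvAllForcedA chains E l = l.all (fun bits => pvHasMonoA (pvColorA E bits) chains) := by
  induction l with
  | nil => rfl
  | cons bits rest ih =>
    rw [pvAllForcedA, List.all_cons]
    by_cases hbit : pvHasMonoA (pvColorA E bits) chains = true
    · rw [if_pos hbit]
      simp [hbit, ih]
    · rw [if_neg hbit]
      simp [hbit]

-- Per candidate n, A's exhaustive verdict equals B's backtracking verdict.
theorem pv_verdict_eq (chains : List (List Int)) (E : List (Int × Int)) (hnd : E.Nodup) :
    (pvAllForcedA chains E (PySem.List.pyRange 0 ((2 : Int) ^ E.length) 1) = true) ↔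
      ¬ (pvSearchB chains E E.length 0 = true) := by
  rw [pv_allForced_eq_all]
  have hs := pv_search_iff chains E hnd E.length (le_refl _) 0 (by simp)
  rw [show ((0:Nat) : Int) = (0:Int) from rfl] at hs
  have h2L : ((2:Int) ^ E.length) = (((2:Nat) ^ E.length : Nat) : Int) := by push_cast; ring
  rw [List.all_eq_true]
  constructor
  · intro hall hsearch
    obtain ⟨h, hh, hF⟩ := hs.1 hsearch
    have hmem : ((h : Nat) : Int) ∈ PySem.List.pyRange 0 ((2:Int) ^ E.length) 1 := by
      rw [PySem.List.mem_pyRange_one]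
      constructor
      · positivity
      · rw [h2L]
        exact_mod_cast hh
    have hmono := hall _ hmem
    rw [pv_hasMono_eq_any, pv_colorA_eq_colorB] at hmono
    rw [show 0 + 2 ^ (E.length - E.length) * h = h by simp] at hF
    rw [hF] at hmono
    simp at hmono
  · intro hns bits hbits
    rw [pv_hasMono_eq_any, pv_colorA_eq_colorB]
    by_contra hF
    apply hns
    apply hs.2
    rw [PySem.List.mem_pyRange_one] at hbits
    refine ⟨bits.toNat, ?_, ?_⟩
    · have := hbits.2
      rw [h2L] at this
      omega
    · rw [show 0 + 2 ^ (E.length - E.length) * bits.toNat = bits.toNat by simp]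
      rw [Int.toNat_of_nonneg hbits.1]
      exact Bool.not_eq_true _ ▸ (Bool.eq_false_iff.2 (fun hx => hF hx))

theorem pv_loop_eq (k : Int) (ns : List Int) : pvLoopA k ns = pvLoopB k ns := by
  induction ns with
  | nil => rfl
  | cons n rest ih =>
    rw [pvLoopA, pvLoopB]
    rw [pv_chains_eq, pv_edges_eq]
    by_cases h1 : (pvChainsB n k).isEmpty
    · simp [h1, ih]
    · by_cases h2 : (pvEdgesB n).isEmpty
      · simp [h1, h2, ih]
      · by_cases h3 : (pvEdgesB n).length ≤ 22
        · have hv := pv_verdict_eq (pvChainsB n k) (pvEdgesB n) (pv_edges_nodup n)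
          by_cases h4 : pvAllForcedA (pvChainsB n k) (pvEdgesB n)
              (PySem.List.pyRange 0 ((2 : Int) ^ (pvEdgesB n).length) 1) = true
          · have h5 := hv.1 h4
            simp [h1, h2, h3, h4, h5]
          · have h5 : pvSearchB (pvChainsB n k) (pvEdgesB n) (pvEdgesB n).length 0 = true := by
              by_contra hc
              exact h4 (hv.2 hc)
            simp [h1, h2, h3, h4, h5, ih]
        · simp [h1, h2, h3, ih]

-- ===== VERDICT (by name: the statement is the Claim_ definition above) =====
theorem divisibility_ramsey_numbers_spec : Claim_equal_divisibility_ramsey_numbers := by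
  intro k max_n _
  unfold Spec_divisibility_ramsey_numbers divisibility_ramsey_numbers divisibility_ramsey_numbers_alt
  exact pv_loop_eq k _
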